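-- pv_equiv track=rewrite | github.com/danou294/AdventOfCode | Day1/part2/script.py | find_name_positions
-- ===== SOURCE A (Python) =====
-- name_to_digit = {
--     'zero': 0,
--     'one': 1,
--     'two': 2,
--     'three': 3,
--     'four': 4,
--     'five': 5,
--     'six': 6,
--     'seven': 7,
--     'eight': 8,
--     'nine': 9
-- }
--
-- def find_first_number(line):
--     number = ""
--     position = -1
--
--     for i, char in enumerate(line):
--         if char.isdigit():
--             number = char
--             position = i
--             break
--
--     return number, position
--
-- def find_name_positions(line):
--     name_positions = {}
--
--     for name in name_to_digit.keys():
--         position = line.find(name)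
--         if position != -1:
--             name_positions[name] = position
--
--     return name_positions
--
--     smallest_position = len(line)
--
--     # Recherche le chiffre numérique ayant la plus petite position
--     first_number, first_position = find_first_number(line)
--     if first_number is not None and first_position < smallest_position:
--         smallest_digit = first_number
--         smallest_position = first_position
--
--     # Recherche le chiffre littéral ayant la plus petite position
--     for name, position in find_name_positions(line).items():
--         if position < smallest_position:
--             if smallest_digit is None or isinstance(smallest_digit, str):
--                 # Si smallest_digit est une chaîne de caractères, faites la correspondance avec name_to_digit
--                 if name in name_to_digit:
--                     smallest_digit = name_to_digit[name]
--                 else: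
--                     smallest_digit = name
--             else:
--                 smallest_digit = name
--             smallest_position = position
--
--     return smallest_digit
-- ===== SOURCE B (Python) =====
-- NAMES = ['zero', 'one', 'two', 'three', 'four', 'five', 'six', 'seven', 'eight', 'nine']
--
-- def find_name_positions(line):
--     found = {}
--     for i in range(len(line)):
--         for name in NAMES:
--             if name not in found and line.startswith(name, i):
--                 found[name] = i
--     return {name: found[name] for name in NAMES if name in found}
-- ===== Notes on version B (the rewrite author's own statement) =====
-- stated objective: alternative
-- what changed: Replaces ten independent str.find scans (one per digit-name) with a single left-to-right scan of the string that tests every digit-name at each position, recording only the first match per name, then emits the dict in canonical name order.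
import Mathlib
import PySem

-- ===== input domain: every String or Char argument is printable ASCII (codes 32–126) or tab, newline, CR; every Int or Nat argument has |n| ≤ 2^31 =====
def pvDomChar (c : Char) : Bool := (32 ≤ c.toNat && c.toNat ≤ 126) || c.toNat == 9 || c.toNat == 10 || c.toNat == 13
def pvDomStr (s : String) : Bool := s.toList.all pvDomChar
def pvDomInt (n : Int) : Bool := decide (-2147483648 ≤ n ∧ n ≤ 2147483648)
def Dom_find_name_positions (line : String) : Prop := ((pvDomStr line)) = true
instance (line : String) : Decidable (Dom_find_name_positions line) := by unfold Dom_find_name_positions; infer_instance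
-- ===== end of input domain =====

-- B replaces A's ten independent str.find scans with one left-to-right scan of the
-- string that tests every digit-name at each position (alternative decomposition).


-- ===== PORT A =====
-- name_to_digit, A's module-level dict
def pvNameToDigit : PySem.Dict String Int :=
  PySem.Dict.ofList [("zero", 0), ("one", 1), ("two", 2), ("three", 3), ("four", 4),
                     ("five", 5), ("six", 6), ("seven", 7), ("eight", 8), ("nine", 9)]

-- for name in name_to_digit.keys(): position = line.find(name); if position != -1: name_positions[name] = position
def find_name_positions (line : String) : List (String × Int) :=
  ((PySem.Dict.keys pvNameToDigit).foldl
    (fun np name =>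
      let position := PySem.Str.find line name
      if position ≠ -1 then PySem.Dict.insert np name position else np)
    PySem.Dict.empty).items

-- ===== PORT B =====
-- NAMES, B's module-level list
def pvNames : List String :=
  ["zero", "one", "two", "three", "four", "five", "six", "seven", "eight", "nine"]

-- inner loop of Source B: for name in NAMES: if name not in found and line.startswith(name, i): found[name] = i
-- line.startswith(name, i) with 0 ≤ i ≤ len(line) is exactly a prefix test on the suffix of
-- line starting at i, which is the list `s` the scan carries — exact on that domain.
def pvCheck (s : List Char) (i : Int) (d : PySem.Dict String Int) : PySem.Dict String Int :=
  pvNames.foldl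
    (fun d name =>
      if !(PySem.Dict.contains d name) && PySem.Chars.startswith s name.toList then
        PySem.Dict.insert d name i
      else d)
    d

-- outer loop of Source B: for i in range(len(line)); the suffix s is line[i:]
def pvScan : List Char → Int → PySem.Dict String Int → PySem.Dict String Int
  | [], _, d => d
  | c :: rest, i, d => pvScan rest (i + 1) (pvCheck (c :: rest) i d)

-- return {name: found[name] for name in NAMES if name in found}
def find_name_positions_alt (line : String) : List (String × Int) :=
  let found := pvScan line.toList 0 PySem.Dict.empty
  (pvNames.foldl
    (fun acc name =>
      match PySem.Dict.get? found name with
      | some v => PySem.Dict.insert acc name v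
      | none => acc)
    PySem.Dict.empty).items

-- ===== PRECONDITION & SPEC =====
def Spec_find_name_positions (line : String) (out : List (String × Int)) : Prop := out = find_name_positions_alt line
instance (line : String) (out : List (String × Int)) : Decidable (Spec_find_name_positions line out) := by unfold Spec_find_name_positions; infer_instance

-- ===== CLAIM (what is proved, stated in full; the proofs are below) =====
def Claim_equal_find_name_positions : Prop := ∀ (line : String), Dom_find_name_positions line → Spec_find_name_positions line (find_name_positions line)

-- ===== LEMMAS AND PROOFS =====

-- the first offset j (as Int) at which `name` is a prefix of s.drop j, if any (proof-only)
def pvFirst (name : List Char) : List Char → Option Int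
  | [] => if PySem.Chars.startswith [] name then some 0 else none
  | c :: t =>
    if PySem.Chars.startswith (c :: t) name then some 0
    else (pvFirst name t).map (· + 1)

-- what one pass of B's inner loop does to any single lookup
theorem pvFoldCheck_get? (L : List String) (s : List Char) (i : Int)
    (d : PySem.Dict String Int) (name : String) :
    PySem.Dict.get? (L.foldl
      (fun d n =>
        if !(PySem.Dict.contains d n) && PySem.Chars.startswith s n.toList then
          PySem.Dict.insert d n i
        else d) d) name =
      if name ∈ L ∧ PySem.Dict.get? d name = none ∧
          PySem.Chars.startswith s name.toList = true then
        some i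
      else PySem.Dict.get? d name := by
  induction L generalizing d with
  | nil => simp
  | cons n rest ih =>
    simp only [List.foldl_cons]
    rw [ih]
    by_cases hn : n = name
    · subst hn
      by_cases hc : PySem.Dict.get? d n = none
      · by_cases hs : PySem.Chars.startswith s n.toList = true
        · have : PySem.Dict.contains d n = false := by
            rw [PySem.Dict.contains_eq_isSome_get?, hc]; rfl
          simp [this, hs, hc, PySem.Dict.get?_insert_self]
        · simp only [Bool.not_eq_true] at hs
          simp [hs, hc]
      · have : PySem.Dict.contains d n = true := by
          rw [PySem.Dict.contains_eq_isSome_get?]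
          cases h : PySem.Dict.get? d n with
          | none => exact absurd h hc
          | some v => rfl
        simp [this, hc]
    · have hmem : (name ∈ n :: rest) = (name ∈ rest) := by
        simp [List.mem_cons, Ne.symm hn]
      by_cases hfire : (!(PySem.Dict.contains d n) && PySem.Chars.startswith s n.toList) = true
      · simp only [hfire, if_pos]
        rw [PySem.Dict.get?_insert_of_ne (hne := Ne.symm hn)]
        simp [Ne.symm hn]
      · simp only [Bool.not_eq_true] at hfire
        simp [hfire, Ne.symm hn]

-- the scan records, per name, the first position at which it matches
theorem pvScan_get? (s : List Char) (i : Int) (d : PySem.Dict String Int) (name : String)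
    (hmem : name ∈ pvNames) (hne : name.toList ≠ []) :
    PySem.Dict.get? (pvScan s i d) name =
      if PySem.Dict.get? d name = none then
        (pvFirst name.toList s).map (i + ·)
      else PySem.Dict.get? d name := by
  induction s generalizing i d with
  | nil =>
    simp only [pvScan, pvFirst]
    have : PySem.Chars.startswith [] name.toList = false := by
      cases h : name.toList with
      | nil => exact absurd h hne
      | cons a b => simp [PySem.Chars.startswith]
    simp [this]
  | cons c rest ih =>
    simp only [pvScan]
    rw [ih]
    simp only [pvCheck] at *
    rw [pvFoldCheck_get?]
    by_cases hd : PySem.Dict.get? d name = none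
    · by_cases hs : PySem.Chars.startswith (c :: rest) name.toList = true
      · simp [hmem, hd, hs, pvFirst]
      · simp only [Bool.not_eq_true] at hs
        simp only [pvFirst, hs]
        simp only [hmem, hd, Bool.false_eq_true, and_false, if_false, if_pos]
        cases pvFirst name.toList rest with
        | none => simp
        | some j => simp; ring
    · simp [hd]

theorem pvFirst_eq_none (name s : List Char)
    (h : ∀ j : Nat, ¬ name <+: s.drop j) : pvFirst name s = none := by
  induction s with
  | nil =>
    have := h 0
    simp at this
    simp only [pvFirst]
    rw [if_neg (fun hsw => this (List.prefix_nil.1 ((PySem.Chars.startswith_iff _ _).1 hsw)))]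
  | cons c t ih =>
    simp only [pvFirst]
    have h0 : ¬ PySem.Chars.startswith (c :: t) name = true := by
      intro hsw
      exact h 0 (by simpa using (PySem.Chars.startswith_iff _ _).1 hsw)
    rw [if_neg h0, ih (fun j => by simpa using h (j + 1))]
    rfl

theorem pvFirst_eq_some (name s : List Char) (hne : name ≠ []) (k : Nat)
    (h1 : name <+: s.drop k) (h2 : ∀ j < k, ¬ name <+: s.drop j) :
    pvFirst name s = some (k : Int) := by
  induction s generalizing k with
  | nil =>
    have h1' : name <+: ([] : List Char) := by simpa using h1
    exact absurd (List.prefix_nil.1 h1') hne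
  | cons c t ih =>
    simp only [pvFirst]
    cases k with
    | zero =>
      rw [if_pos ((PySem.Chars.startswith_iff _ _).2 (by simpa using h1))]
      rfl
    | succ j =>
      have h0 : ¬ PySem.Chars.startswith (c :: t) name = true := by
        intro hsw
        exact h2 0 (Nat.succ_pos j) (by simpa using (PySem.Chars.startswith_iff _ _).1 hsw)
      rw [if_neg h0,
        ih j (by simpa using h1) (fun j' hj' => by simpa using h2 (j' + 1) (by omega))]
      simp
      try push_cast
      try ring

-- pvFirst agrees with Python's str.find
theorem pvFirst_eq_find (name s : List Char) (hne : name ≠ []) :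
    pvFirst name s =
      if PySem.Chars.find s name = -1 then none else some (PySem.Chars.find s name) := by
  by_cases h : PySem.Chars.find s name = -1
  · rw [if_pos h]
    have hnin := (PySem.Chars.find_eq_neg_one_iff s name).1 h
    refine pvFirst_eq_none name s (fun j hpre => ?_)
    exact hnin (hpre.isInfix.trans (List.drop_suffix j s).isInfix)
  · rw [if_neg h]
    have hnn : 0 ≤ PySem.Chars.find s name := by
      rcases (lt_or_ge (PySem.Chars.find s name) 0) with hlt | hge
      · exfalso
        have := PySem.Chars.neg_one_le_find s name
        omega
      · exact hge
    obtain ⟨hp, hmin⟩ := PySem.Chars.find_spec (s := s) (sub := name) hnn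
    have := pvFirst_eq_some name s hne (PySem.Chars.find s name).toNat hp hmin
    rw [this]
    congr 1
    omega

-- B's `found` dict agrees, per name, with A's line.find(name)
theorem pvFound_get? (line : String) (name : String) (hmem : name ∈ pvNames) :
    PySem.Dict.get? (pvScan line.toList 0 PySem.Dict.empty) name =
      if PySem.Str.find line name = -1 then none
      else some (PySem.Str.find line name) := by
  have hne : name.toList ≠ [] := by
    have : ∀ n ∈ pvNames, n.toList ≠ [] := by decide
    exact this name hmem
  rw [pvScan_get? _ _ _ _ hmem hne]
  simp only [PySem.Dict.get?_empty, if_pos rfl]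
  rw [pvFirst_eq_find _ _ hne]
  have hfind : PySem.Str.find line name = PySem.Chars.find line.toList name.toList := by
    simp
  rw [hfind]
  by_cases h : PySem.Chars.find line.toList name.toList = -1 <;> simp [h]

-- ===== VERDICT (by name: the statement is the Claim_ definition above) =====
theorem find_name_positions_spec : Claim_equal_find_name_positions := by
  intro line _
  unfold Spec_find_name_positions
  unfold find_name_positions find_name_positions_alt
  have hkeys : PySem.Dict.keys pvNameToDigit = pvNames := by decide
  rw [hkeys]
  congr 1
  apply PySem.List.foldl_congr_mem
  intro acc n hn
  rw [pvFound_get? line n hn]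
  by_cases h : PySem.Chars.find line.toList n.toList = -1 <;> simp [h]
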